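-- pv_equiv track=rewrite | github.com/migueelzz/sap-ai-agent-hybrid-rag | app/routers/chat.py | _next_in_chain
-- ===== SOURCE A (Python) =====
-- _SKILL_CHAINS: dict[str, list[str]] = {
--     "cds-doc-analysis": [
--         "cds-structural-analysis",
--         "cds-behavior-analysis",
--         "cds-context-inference",
--         "cds-doc-generator",
--     ],
-- }
--
-- def _next_in_chain(skill_name: str | None) -> str | None:
--     """Retorna o próximo skill na chain, ou None se for o último ou não pertencer a nenhuma chain."""
--     if not skill_name:
--         return None
--     for chain in _SKILL_CHAINS.values():
--         if skill_name in chain: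
--             idx = chain.index(skill_name)
--             return chain[idx + 1] if idx + 1 < len(chain) else None
--     return None
-- ===== SOURCE B (Python) =====
-- _SKILL_CHAINS: dict[str, list[str]] = {
--     "cds-doc-analysis": [
--         "cds-structural-analysis",
--         "cds-behavior-analysis",
--         "cds-context-inference",
--         "cds-doc-generator",
--     ],
-- }
--
-- # Successor table built once from consecutive pairs of every chain.
-- _NEXT: dict[str, str] = {
--     a: b
--     for chain in _SKILL_CHAINS.values()
--     for a, b in zip(chain, chain[1:])
-- }
--
-- def _next_in_chain(skill_name: str | None) -> str | None:
--     if not skill_name: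
--         return None
--     return _NEXT.get(skill_name)
-- ===== Notes on version B (the rewrite author's own statement) =====
-- stated objective: simpler
-- what changed: Replaces the loop over chains with its membership test, .index scan and bounds check by a module-level successor dict built once from consecutive pairs; the function becomes a guard plus one table lookup.
import Mathlib
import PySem

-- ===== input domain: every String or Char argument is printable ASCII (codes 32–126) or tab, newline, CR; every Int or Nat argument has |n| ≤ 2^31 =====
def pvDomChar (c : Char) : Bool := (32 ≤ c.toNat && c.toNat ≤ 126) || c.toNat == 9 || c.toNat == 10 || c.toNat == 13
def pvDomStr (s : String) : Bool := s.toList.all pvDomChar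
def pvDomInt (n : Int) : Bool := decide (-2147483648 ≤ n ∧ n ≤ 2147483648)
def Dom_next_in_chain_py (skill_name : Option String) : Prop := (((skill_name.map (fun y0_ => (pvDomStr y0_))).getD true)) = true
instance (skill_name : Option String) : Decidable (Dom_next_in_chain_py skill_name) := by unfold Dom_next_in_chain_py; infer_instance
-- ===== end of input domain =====

-- B replaces the loop + membership + .index scan by a successor table built once; objective: simpler.

-- ===== PORT A =====
-- _SKILL_CHAINS.values() : the list of chains, in insertion order
def pvChainsA : List (List String) :=
  [["cds-structural-analysis", "cds-behavior-analysis",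
    "cds-context-inference", "cds-doc-generator"]]

-- the 'for chain in _SKILL_CHAINS.values()' loop with its early return
def pvLoopA (name : String) : List (List String) → Option String
  | [] => none
  | chain :: rest =>
    if name ∈ chain then
      match PySem.List.index? chain name with
      | some idx =>
        if idx + 1 < chain.length then PySem.List.pyGet? chain ((idx : Int) + 1) else none
      | none => none   -- unreachable: membership held
    else pvLoopA name rest

def next_in_chain_py (skill_name : Option String) : Option String :=
  match skill_name with
  | none => none
  | some name => if name = "" then none else pvLoopA name pvChainsA

-- ===== PORT B =====
-- _NEXT = {a: b for chain in _SKILL_CHAINS.values() for a, b in zip(chain, chain[1:])}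
def pvNextB : PySem.Dict String String :=
  pvChainsA.foldl
    (fun d chain => (chain.zip chain.tail).foldl (fun d p => d.insert p.1 p.2) d)
    PySem.Dict.empty

def next_in_chain_py_alt (skill_name : Option String) : Option String :=
  match skill_name with
  | none => none
  | some name => if name = "" then none else pvNextB.get? name

-- ===== PRECONDITION & SPEC =====
def Spec_next_in_chain_py (skill_name : Option String) (out : Option String) : Prop := out = next_in_chain_py_alt skill_name
instance (skill_name : Option String) (out : Option String) : Decidable (Spec_next_in_chain_py skill_name out) := by unfold Spec_next_in_chain_py; infer_instance

-- ===== CLAIM (what is proved, stated in full; the proofs are below) =====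
def Claim_equal_next_in_chain_py : Prop := ∀ (skill_name : Option String), Dom_next_in_chain_py skill_name → Spec_next_in_chain_py skill_name (next_in_chain_py skill_name)

-- ===== LEMMAS AND PROOFS =====

-- For any string, A's loop and B's table agree: case split on the four chain entries.
lemma pv_loop_eq_table (name : String) : pvLoopA name pvChainsA = pvNextB.get? name := by
  by_cases h1 : name = "cds-structural-analysis"
  · subst h1; decide
  by_cases h2 : name = "cds-behavior-analysis"
  · subst h2; decide
  by_cases h3 : name = "cds-context-inference"
  · subst h3; decide
  by_cases h4 : name = "cds-doc-generator"
  · subst h4; decide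
  -- name matches no chain element: loop falls through, lookup misses
  have hb : ∀ s : String, name ≠ s → (s == name) = false := by
    intro s hs; simp; exact fun h => hs h.symm
  simp [pvLoopA, pvChainsA, pvNextB, PySem.Dict.empty, PySem.Dict.insert,
        PySem.Dict.get?, h1, h2, h3, h4, hb _ h1, hb _ h2, hb _ h3]

-- ===== VERDICT (by name: the statement is the Claim_ definition above) =====
theorem next_in_chain_py_spec : Claim_equal_next_in_chain_py := by
  intro skill_name _
  unfold Spec_next_in_chain_py next_in_chain_py next_in_chain_py_alt
  match skill_name with
  | none => rfl
  | some name =>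
    by_cases he : name = ""
    · simp [he]
    · simp [he, pv_loop_eq_table name]
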